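-- pv_equiv track=rewrite | github.com/emsec/hal | tools/check_documentation.py | extract_return_type
-- ===== SOURCE A (Python) =====
-- def index_of_last_block(text, block_start, block_end):
--     last_end = len(text) - 1 - text[::-1].index(block_end)
--     level = -1
--     for i in range(last_end-1, -1, -1):
--         if text[i] == block_end: level -= 1
--         if text[i] == block_start:
--             level += 1
--             if level == 0:
--                 return i
--     return None
--
-- def blind_block(text, block_start, block_end):
--     patches = ["operator<<", "operator>>", "operator[]", "operator()"]
--     for i, p in enumerate(patches):
--         text = text.replace(p, f"___PATCH##{i}##___")
--     tmp = ""
--     lvl = 0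
--     for c in text:
--         if c == block_end and lvl > 0: lvl -= 1
--         if lvl == 0:
--             tmp += c
--         else:
--             tmp += "#"
--         if c == block_start: lvl += 1
--     for i, p in enumerate(patches):
--         tmp = tmp.replace(f"___PATCH##{i}##___", p)
--     return tmp
--
-- def extract_return_type(line):
--     # ignore reserved keywords
--     for x in ["explicit", "static", "typedef", "inline", "virtual"]:
--         line = line.replace(x,"")
--
--     line = blind_block(line[:index_of_last_block(line,"(",")")],"<",">").strip()
--
--     # no space before "(" --> we have a constructor
--     if ' ' not in line:
--         return None
--
--     line = line[:len(line)-1-line[::-1].index(' ')]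
--
--     return line.split()[-1]
-- ===== SOURCE B (Python) =====
-- def blind_block(text, block_start, block_end):
--     patches = ["operator<<", "operator>>", "operator[]", "operator()"]
--     for i, p in enumerate(patches):
--         text = text.replace(p, f"___PATCH##{i}##___")
--     tmp = ""
--     lvl = 0
--     for c in text:
--         if c == block_end and lvl > 0: lvl -= 1
--         if lvl == 0:
--             tmp += c
--         else:
--             tmp += "#"
--         if c == block_start: lvl += 1
--     for i, p in enumerate(patches):
--         tmp = tmp.replace(f"___PATCH##{i}##___", p)
--     return tmp
--
--
-- def last_block_opener(text, block_start, block_end):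
--     # Opener matching the last closer, found by ONE FORWARD pass with an index
--     # stack over the prefix before that closer (instead of a backward level scan).
--     last = text.rindex(block_end)      # ValueError when no closer, like A
--     stack = []
--     for i, c in enumerate(text[:last]):
--         if c == block_start:
--             stack.append(i)
--         elif c == block_end and stack:
--             stack.pop()
--     return stack[-1] if stack else None
--
--
-- def extract_return_type(line):
--     # ignore reserved keywords
--     for x in ["explicit", "static", "typedef", "inline", "virtual"]:
--         line = line.replace(x, "")
--
--     line = blind_block(line[:last_block_opener(line, "(", ")")], "<", ">").strip()
--
--     # no space before "(" --> we have a constructor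
--     if ' ' not in line:
--         return None
--
--     head, _, _ = line.rpartition(' ')
--     return head.split()[-1]
-- ===== Notes on version B (the rewrite author's own statement) =====
-- stated objective: alternative
-- what changed: The opener of the last parenthesis block is found by one forward pass that pushes opener indices on a stack and pops at closers, returning the stack top (instead of a backward level-counting scan from the reversed-string index of the last closer), and the final token is cut out with str.rpartition instead of reversed-index slice arithmetic.
import Mathlib
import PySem

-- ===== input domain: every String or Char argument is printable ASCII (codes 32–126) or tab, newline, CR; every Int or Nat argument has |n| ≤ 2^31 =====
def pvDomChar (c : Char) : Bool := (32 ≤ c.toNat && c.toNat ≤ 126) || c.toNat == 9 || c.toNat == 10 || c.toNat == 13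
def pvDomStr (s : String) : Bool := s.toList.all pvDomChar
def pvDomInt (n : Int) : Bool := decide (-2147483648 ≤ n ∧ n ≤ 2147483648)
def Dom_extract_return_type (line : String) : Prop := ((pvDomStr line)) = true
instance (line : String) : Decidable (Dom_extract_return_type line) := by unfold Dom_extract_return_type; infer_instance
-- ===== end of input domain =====

-- B finds the opener of the last parenthesis block with one forward stack pass instead of a
-- reversed-string index plus a backward level-counting scan, and cuts the final token with
-- rpartition instead of reversed-index slice arithmetic (objective: alternative, same cost).

-- ===== PORT A =====
-- helpers shared verbatim by both Pythons (keyword stripping and blind_block are identical in Source A and Source B)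
def stripKeywords (l : List Char) : List Char :=
  ["explicit".toList, "static".toList, "typedef".toList, "inline".toList, "virtual".toList].foldl
    (fun s x => PySem.Chars.replace s x []) l

def pvPatches : List (List Char) :=
  ["operator<<".toList, "operator>>".toList, "operator[]".toList, "operator()".toList]

def pvPlaceholder (i : Int) : List Char :=
  "___PATCH##".toList ++ (PySem.Int.toStr i).toList ++ "##___".toList

def blindLoop (bs be : Char) : List Char → List Char → Int → List Char
  | [], tmp, _lvl => tmp
  | c :: cs, tmp, lvl =>
    let lvl1 := if c = be ∧ lvl > 0 then lvl - 1 else lvl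
    let tmp1 := tmp ++ (if lvl1 = 0 then [c] else ['#'])
    let lvl2 := if c = bs then lvl1 + 1 else lvl1
    blindLoop bs be cs tmp1 lvl2

def blind_block (text : List Char) (bs be : Char) : List Char :=
  let t := (PySem.List.enumerate pvPatches).foldl
    (fun t ip => PySem.Chars.replace t ip.2 (pvPlaceholder ip.1)) text
  let tmp := blindLoop bs be t [] 0
  (PySem.List.enumerate pvPatches).foldl
    (fun t ip => PySem.Chars.replace t (pvPlaceholder ip.1) ip.2) tmp

-- A's index_of_last_block: reversed index for the last closer, then a backward level scan
def ilbGo (text : List Char) (bs be : Char) : List Int → Int → Option Int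
  | [], _level => none
  | i :: rest, level =>
    let c := PySem.List.pyGetD text i ' '
    let level1 := if c = be then level - 1 else level
    if c = bs then
      if level1 + 1 = 0 then some i else ilbGo text bs be rest (level1 + 1)
    else ilbGo text bs be rest level1

-- outer `none` = Python's ValueError from text[::-1].index (excluded by Pre_)
def index_of_last_block (text : List Char) (bs be : Char) : Option (Option Int) :=
  match PySem.List.index? text.reverse be with
  | none => none
  | some k =>
    some (ilbGo text bs be
      (PySem.List.pyRange ((text.length : Int) - 1 - (k : Int) - 1) (-1) (-1)) (-1))

-- the tail of A's extract_return_type, from `if ' ' not in line` on (argument = the blinded line)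
def ertA_tail (l1 : List Char) : Option String :=
  if PySem.Chars.isIn [' '] l1 then
    match PySem.List.index? l1.reverse ' ' with
    | none => none   -- unreachable: ' ' ∈ l1 in this branch
    | some k =>
      match (PySem.Chars.split₀
          (PySem.List.slice l1 none (some ((l1.length : Int) - 1 - (k : Int))))).getLast? with
      | none => none   -- Python would raise IndexError; unreachable (the slice keeps a non-space char)
      | some w => some (String.ofList w)
  else none

def extract_return_type (line : String) : Option String :=
  match index_of_last_block (stripKeywords line.toList) '(' ')' with
  | none => none   -- Python raises ValueError here; outside Pre_
  | some opener =>
    ertA_tail (PySem.Chars.strip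
      (blind_block (PySem.List.slice (stripKeywords line.toList) none opener) '<' '>'))

-- ===== PORT B =====
-- B's last_block_opener: one forward pass over the prefix before the last closer,
-- pushing opener indices and popping at closers; the stack top is the answer
def stackStep (bs be : Char) (st : List Int) (ic : Int × Char) : List Int :=
  if ic.2 = bs then ic.1 :: st
  else if ic.2 = be then
    (match st with   -- `elif c == block_end and stack: stack.pop()` (no-op on empty stack)
     | _ :: t => t
     | [] => [])
  else st

-- outer `none` = Python's ValueError from text.rindex (excluded by Pre_);
-- rindex ported, exactly, as length - 1 - reversed-index
def last_block_opener (text : List Char) (bs be : Char) : Option (Option Int) :=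
  match PySem.List.index? text.reverse be with
  | none => none
  | some r =>
    some (((PySem.List.enumerate (PySem.List.slice text none
      (some ((text.length : Int) - 1 - (r : Int))))).foldl (stackStep bs be) []).head?)

-- hand port of str.rpartition(c)[0] for a single-char separator: exact —
-- everything before the LAST occurrence of c, [] when c is absent
def rpartitionBefore (s : List Char) (c : Char) : List Char :=
  match PySem.List.index? s.reverse c with
  | none => []
  | some k => (s.reverse.drop (k + 1)).reverse

-- the tail of B's extract_return_type, from `if ' ' not in line` on (argument = the blinded line)
def ertB_tail (l1 : List Char) : Option String :=
  if PySem.Chars.isIn [' '] l1 then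
    match (PySem.Chars.split₀ (rpartitionBefore l1 ' ')).getLast? with
    | none => none   -- Python would raise IndexError; unreachable (head keeps a non-space char)
    | some w => some (String.ofList w)
  else none

def extract_return_type_alt (line : String) : Option String :=
  match last_block_opener (stripKeywords line.toList) '(' ')' with
  | none => none   -- Python raises ValueError here; outside Pre_
  | some opener =>
    ertB_tail (PySem.Chars.strip
      (blind_block (PySem.List.slice (stripKeywords line.toList) none opener) '<' '>'))

-- ===== PRECONDITION & SPEC =====
-- Pre_ excludes exactly the lines with no closing parenthesis: there Python A raises
-- ValueError (from line[::-1].index), and B's rindex raises the same error.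
def Pre_extract_return_type (line : String) : Prop := PySem.Chars.isIn [')'] line.toList = true
instance (line : String) : Decidable (Pre_extract_return_type line) := by
  unfold Pre_extract_return_type; infer_instance

def pvWitness_extract_return_type : String := "static int get_x(void) const"

def Spec_extract_return_type (line : String) (out : Option String) : Prop :=
  out = extract_return_type_alt line
instance (line : String) (out : Option String) : Decidable (Spec_extract_return_type line out) := by
  unfold Spec_extract_return_type; infer_instance

-- ===== CLAIM (what is proved, stated in full; the proofs are below) =====
def Claim_equal_extract_return_type : Prop :=
  ∀ (line : String), Dom_extract_return_type line → Pre_extract_return_type line →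
    Spec_extract_return_type line (extract_return_type line)

-- ===== LEMMAS AND PROOFS =====

-- a char not occurring in the pattern survives Chars.replace.go
theorem mem_replace_go (old new : List Char) (c : Char) (hc : c ∉ old) :
    ∀ (fuel : Nat) (l acc : List Char), (c ∈ l ∨ c ∈ acc) →
      c ∈ PySem.Chars.replace.go old new fuel l acc := by
  intro fuel
  induction fuel with
  | zero =>
    intro l acc h
    simp only [PySem.Chars.replace.go]
    rcases h with h | h
    · exact List.mem_append.2 (Or.inr h)
    · exact List.mem_append.2 (Or.inl (List.mem_reverse.2 h))
  | succ fuel ih =>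
    intro l acc h
    cases l with
    | nil =>
      simp only [PySem.Chars.replace.go]
      rcases h with h | h
      · cases h
      · exact List.mem_reverse.2 h
    | cons c' t =>
      rw [PySem.Chars.replace.go]
      split_ifs with hp
      · apply ih
        rcases h with h | h
        · have hpre : old <+: (c' :: t) := List.isPrefixOf_iff_prefix.1 hp
          obtain ⟨t', ht'⟩ := hpre
          rw [← ht', List.drop_left]
          rcases List.mem_append.1 (ht' ▸ h) with h1 | h1
          · exact absurd h1 hc
          · exact Or.inl h1
        · exact Or.inr (List.mem_append.2 (Or.inr h))
      · apply ih
        rcases h with h | h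
        · rcases List.mem_cons.1 h with h1 | h1
          · exact Or.inr (h1 ▸ List.mem_cons_self ..)
          · exact Or.inl h1
        · exact Or.inr (List.mem_cons_of_mem _ h)

theorem mem_replace (s old new : List Char) (c : Char) (hc : c ∉ old)
    (hne : old.isEmpty = false) (h : c ∈ s) : c ∈ PySem.Chars.replace s old new := by
  rw [PySem.Chars.replace, if_neg (by simp [hne])]
  exact mem_replace_go old new c hc s.length s [] (Or.inl h)

theorem mem_stripKeywords (l : List Char) (h : (')' : Char) ∈ l) :
    (')' : Char) ∈ stripKeywords l := by
  simp only [stripKeywords, List.foldl_cons, List.foldl_nil]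
  apply mem_replace _ _ _ _ (by decide) (by decide)
  apply mem_replace _ _ _ _ (by decide) (by decide)
  apply mem_replace _ _ _ _ (by decide) (by decide)
  apply mem_replace _ _ _ _ (by decide) (by decide)
  apply mem_replace _ _ _ _ (by decide) (by decide)
  exact h

theorem isIn_singleton_iff (c : Char) (l : List Char) :
    PySem.Chars.isIn [c] l = true ↔ c ∈ l := by
  rw [PySem.Chars.isIn_iff_infix]
  constructor
  · intro hinf
    obtain ⟨p, q, hpq⟩ := hinf
    rw [← hpq]; simp
  · intro hm
    obtain ⟨p, q, rfl⟩ := List.append_of_mem hm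
    exact ⟨p, q, by simp⟩

theorem pyRange_down_nil : PySem.List.pyRange (-1) (-1) (-1) = [] := by
  norm_num [PySem.List.pyRange]

theorem pyRange_one_self (a : Int) : PySem.List.pyRange a a 1 = [] := by
  norm_num [PySem.List.pyRange]

theorem pyRange_down_succ (n : Nat) :
    PySem.List.pyRange (n : Int) (-1) (-1)
      = (n : Int) :: PySem.List.pyRange ((n : Int) - 1) (-1) (-1) := by
  have e0 : ∀ a : Int, PySem.List.pyRange a (-1) (-1) = (PySem.List.pyRange 0 (a + 1) 1).reverse := by
    intro a
    rw [PySem.List.pyRange_neg_one_eq_reverse]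
    norm_num
  rw [e0, e0]
  have e1 : (n : Int) - 1 + 1 = (n : Int) := by ring
  rw [e1]
  rw [PySem.List.pyRange_one_append 0 (n : Int) ((n : Int) + 1) (by positivity) (by omega)]
  rw [PySem.List.pyRange_one_cons (by omega : (n : Int) < (n : Int) + 1), pyRange_one_self]
  simp

-- the backward level scan, restated structurally on the reversed prefix
def backScan : List Char → Nat → Option Int
  | [], _ => none
  | c :: rest, kk =>
    if c = ')' then backScan rest (kk + 1)
    else if c = '(' then (if kk = 0 then some (rest.length : Int) else backScan rest (kk - 1))
    else backScan rest kk

theorem ilb_eq_backScan (l : List Char) :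
    ∀ (n kk : Nat), n ≤ l.length →
      ilbGo l '(' ')' (PySem.List.pyRange ((n : Int) - 1) (-1) (-1)) (-(kk : Int) - 1)
        = backScan (l.take n).reverse kk := by
  intro n
  induction n with
  | zero =>
    intro kk _
    norm_num [pyRange_down_nil, ilbGo, backScan]
  | succ n ih =>
    intro kk h
    have hn : n < l.length := by omega
    have harg : ((n + 1 : Nat) : Int) - 1 = (n : Int) := by push_cast; ring
    have hget : PySem.List.pyGetD l ((n : Int)) ' ' = l[n] := by
      simp [PySem.List.pyGetD, List.getElem?_eq_getElem hn]
    have htake : (l.take (n + 1)).reverse = l[n] :: (l.take n).reverse := by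
      rw [List.take_succ]
      simp [List.getElem?_eq_getElem hn]
    rw [harg, pyRange_down_succ n, htake]
    by_cases h1 : l[n] = ')'
    · have h2 : ¬ (l[n] = '(') := by rw [h1]; decide
      have hk1 : -(kk : Int) - 1 - 1 = -((kk + 1 : Nat) : Int) - 1 := by push_cast; ring
      simp only [ilbGo, hget, h1, backScan, if_pos rfl, if_neg (by decide : ¬ ((')' : Char) = '('))]
      rw [hk1]
      exact ih (kk + 1) (by omega)
    · by_cases h2 : l[n] = '('
      · have h3 : ¬ (l[n] = ')') := h1
        simp only [ilbGo, hget, h2, backScan, if_neg (by decide : ¬ (('(' : Char) = ')')),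
          if_pos rfl]
        rcases Nat.eq_zero_or_pos kk with hkk | hkk
        · subst hkk
          norm_num [Nat.min_eq_left (Nat.le_of_lt hn)]
        · have hne : ¬ (-(kk : Int) - 1 + 1 = 0) := by omega
          have hcast : -(kk : Int) - 1 + 1 = -((kk - 1 : Nat) : Int) - 1 := by
            have : (1 : Int) ≤ (kk : Int) := by exact_mod_cast hkk
            push_cast [Nat.cast_sub hkk]
            ring
          rw [if_neg hne, if_neg (by omega : ¬ kk = 0), hcast]
          exact ih (kk - 1) (by omega)
      · simp only [ilbGo, hget, backScan, if_neg h1, if_neg h2]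
        exact ih kk (by omega)

-- B's fold, restated structurally
def fwdStk (s : Int) : List Char → List Int → List Int
  | [], st => st
  | c :: cs, st => fwdStk (s + 1) cs (stackStep '(' ')' st (s, c))

theorem foldl_enumerate_eq_fwdStk (cs : List Char) :
    ∀ (s : Int) (st : List Int),
      (PySem.List.enumerate cs s).foldl (stackStep '(' ')') st = fwdStk s cs st := by
  induction cs with
  | nil => intro s st; simp [PySem.List.enumerate_nil, fwdStk]
  | cons c cs ih =>
    intro s st
    rw [PySem.List.enumerate_cons, List.foldl_cons, ih, fwdStk]

theorem fwdStk_append (xs ys : List Char) :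
    ∀ (s : Int) (st : List Int),
      fwdStk s (xs ++ ys) st = fwdStk (s + xs.length) ys (fwdStk s xs st) := by
  induction xs with
  | nil => intro s st; simp [fwdStk]
  | cons x xs ih =>
    intro s st
    rw [List.cons_append, fwdStk, fwdStk, ih]
    congr 1
    simp only [List.length_cons]
    push_cast
    ring

theorem backScan_eq_fwdStk (m : List Char) :
    ∀ kk : Nat, backScan m.reverse kk = (fwdStk 0 m [])[kk]? := by
  induction m using List.reverseRecOn with
  | nil => intro kk; simp [backScan, fwdStk]
  | append_singleton m c ih =>
    intro kk
    have hsplit : fwdStk 0 (m ++ [c]) [] = stackStep '(' ')' (fwdStk 0 m []) ((m.length : Int), c) := by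
      rw [fwdStk_append]
      norm_num [fwdStk]
    have hback : (m ++ [c]).reverse = c :: m.reverse := by simp
    rw [hsplit, hback]
    by_cases h1 : c = ')'
    · simp only [backScan, h1, stackStep, if_neg (by decide : ¬ ((')' : Char) = '('))]
      rw [ih (kk + 1)]
      rcases fwdStk 0 m [] with _ | ⟨h, t⟩
      · simp
      · simp
    · by_cases h2 : c = '('
      · simp only [backScan, h2, if_neg (by decide : ¬ (('(' : Char) = ')')), stackStep]
        cases kk with
        | zero => simp
        | succ kk =>
          rw [if_neg (by omega : ¬ kk + 1 = 0)]
          have hkk : kk + 1 - 1 = kk := by omega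
          rw [hkk, ih kk]
          simp
      · simp only [backScan, if_neg h1, if_neg h2, stackStep, h1, h2]
        rw [ih kk]
        simp [h1, h2]

theorem opener_eq (l : List Char) (k : Nat) (hk : PySem.List.index? l.reverse ')' = some k) :
    ∃ op, index_of_last_block l '(' ')' = some op ∧ last_block_opener l '(' ')' = some op := by
  obtain ⟨pre, suf, hrev, hlen, hnot⟩ := (PySem.List.index?_eq_some_iff _ _ _).1 hk
  have hl : l = suf.reverse ++ ')' :: pre.reverse := by
    have := congrArg List.reverse hrev
    simpa using this
  have hlength : l.length = suf.length + 1 + pre.length := by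
    rw [hl]; simp only [List.length_append, List.length_cons, List.length_reverse]; omega
  have hargs : (l.length : Int) - 1 - (k : Int) - 1 = ((suf.length : Nat) : Int) - 1 := by
    rw [hlength, ← hlen]; push_cast; ring
  have hIL := ilb_eq_backScan l suf.length 0 (by omega)
  simp only [Nat.cast_zero, neg_zero, zero_sub] at hIL
  have htake : l.take suf.length = suf.reverse := by
    rw [hl]; exact List.take_left' (by simp)
  have hn2 : (l.length : Int) - 1 - (k : Int) = ((suf.length : Nat) : Int) := by
    rw [hlength, ← hlen]; push_cast; ring
  have hslice : PySem.List.slice l none (some ((l.length : Int) - 1 - (k : Int))) = suf.reverse := by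
    rw [hn2, PySem.List.slice_to_natCast, htake]
  refine ⟨(fwdStk 0 suf.reverse []).head?, ?_, ?_⟩
  · simp only [index_of_last_block, hk]
    rw [hargs, hIL, htake]
    congr 1
    rw [backScan_eq_fwdStk suf.reverse 0]
    exact List.head?_eq_getElem?.symm
  · simp only [last_block_opener, hk]
    rw [hslice, foldl_enumerate_eq_fwdStk]

theorem slice_eq_rpartition (l : List Char) (k : Nat)
    (hk : PySem.List.index? l.reverse ' ' = some k) :
    PySem.List.slice l none (some ((l.length : Int) - 1 - (k : Int))) = rpartitionBefore l ' ' := by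
  obtain ⟨pre, suf, hrev, hlen, hnot⟩ := (PySem.List.index?_eq_some_iff _ _ _).1 hk
  have hl : l = suf.reverse ++ ' ' :: pre.reverse := by
    have := congrArg List.reverse hrev
    simpa using this
  have hlength : l.length = suf.length + 1 + pre.length := by
    rw [hl]; simp only [List.length_append, List.length_cons, List.length_reverse]; omega
  have hn : (l.length : Int) - 1 - (k : Int) = ((suf.length : Nat) : Int) := by
    rw [hlength, ← hlen]; push_cast; ring
  have hdrop : (pre ++ ' ' :: suf).drop (k + 1) = suf := by
    have hsp : pre ++ ' ' :: suf = (pre ++ [' ']) ++ suf := by simp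
    rw [hsp]
    exact List.drop_left' (by simp [← hlen])
  rw [hn, PySem.List.slice_to_natCast]
  simp only [rpartitionBefore, hk]
  rw [hrev, hdrop, hl]
  exact List.take_left' (by simp)

theorem tail_eq (l1 : List Char) : ertA_tail l1 = ertB_tail l1 := by
  unfold ertA_tail ertB_tail
  by_cases hsp : PySem.Chars.isIn [' '] l1 = true
  · rw [if_pos hsp, if_pos hsp]
    split
    · rename_i heq
      have hmem : (' ' : Char) ∈ l1 := (isIn_singleton_iff _ _).1 hsp
      rw [PySem.List.index?_eq_none_iff] at heq
      exact absurd (List.mem_reverse.2 hmem) heq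
    · rename_i k2 heq
      rw [slice_eq_rpartition l1 k2 heq]
  · rw [if_neg hsp, if_neg hsp]

-- ===== VERDICT (by name: the statement is the Claim_ definition above) =====
set_option maxHeartbeats 1000000 in
theorem extract_return_type_spec : Claim_equal_extract_return_type := by
  intro line _hdom hpre
  unfold Spec_extract_return_type
  unfold Pre_extract_return_type at hpre
  have h1 : (')' : Char) ∈ line.toList := (isIn_singleton_iff _ _).1 hpre
  have h2 : (')' : Char) ∈ stripKeywords line.toList := mem_stripKeywords _ h1
  obtain ⟨k, hk⟩ : ∃ k, PySem.List.index? (stripKeywords line.toList).reverse ')' = some k := by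
    have := (PySem.List.index?_isSome_iff (stripKeywords line.toList).reverse ')').2
      (List.mem_reverse.2 h2)
    exact Option.isSome_iff_exists.1 this
  unfold extract_return_type extract_return_type_alt
  obtain ⟨op, hA, hB⟩ := opener_eq _ _ hk
  rw [hA, hB]
  exact tail_eq _
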